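-- pv_equiv track=rewrite | github.com/abitabir/ScaleyStuffs | uni/UG1/Term 1/SOF1/Practicals/Practical 4 - 18.10.2019/exercise 2.py | pairwise_digits
-- ===== SOURCE A (Python) =====
-- def  pairwise_digits(first_given_number, second_given_number):
--     output = ''
--
--     first_digits = list(str(first_given_number))
--     second_digits = list(str(second_given_number))
--
--     if len(first_digits) > len(second_digits):
--         longer_digits = first_digits
--         shorter_digits = second_digits
--     else:
--         shorter_digits = first_digits
--         longer_digits = second_digits
--
--     for i in range(len(shorter_digits)):
--         if longer_digits[i] == shorter_digits[i]:
--             output = output + '1'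
--         else:
--             output = output + '0'
--
--     for j in range((len(longer_digits)-len(shorter_digits))):
--         output = output + '0'
--
--     return(output)
-- ===== SOURCE B (Python) =====
-- def pairwise_digits(first_given_number, second_given_number):
--     def go(xs, ys):
--         if not xs and not ys:
--             return ''
--         bit = '1' if xs and ys and xs[0] == ys[0] else '0'
--         return bit + go(xs[1:], ys[1:])
--     return go(str(first_given_number), str(second_given_number))
-- ===== Notes on version B (the rewrite author's own statement) =====
-- stated objective: alternative
-- what changed: B replaces A's longer/shorter branching, index-based compare loop and separate zero-padding loop by a single structural recursion that consumes both digit strings head-by-head, emitting '1' on matching heads and '0' when they differ or one string is exhausted, building the result back-to-front by cons.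
import Mathlib
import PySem

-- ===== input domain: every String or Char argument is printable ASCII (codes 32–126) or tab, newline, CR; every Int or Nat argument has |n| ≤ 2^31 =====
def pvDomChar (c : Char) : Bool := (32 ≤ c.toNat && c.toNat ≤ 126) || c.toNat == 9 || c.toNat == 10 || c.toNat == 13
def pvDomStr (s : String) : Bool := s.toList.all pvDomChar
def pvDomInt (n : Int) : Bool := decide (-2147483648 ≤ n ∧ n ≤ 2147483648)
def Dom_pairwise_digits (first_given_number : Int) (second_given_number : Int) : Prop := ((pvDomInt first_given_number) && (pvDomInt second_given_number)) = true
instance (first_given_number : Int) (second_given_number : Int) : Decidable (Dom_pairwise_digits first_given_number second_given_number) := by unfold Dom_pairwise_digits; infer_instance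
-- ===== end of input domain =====

-- B replaces A's longer/shorter branching and its two index loops (compare + zero-pad) by
-- one structural recursion consuming both digit strings head-by-head; alternative decomposition.

-- ===== PORT A =====
-- A, step for step: pick longer/shorter digit lists, compare positionwise over the
-- shorter length, then pad with '0' for the length difference; concatenation accumulator.
def pairwise_digits (first_given_number : Int) (second_given_number : Int) : String :=
  let first_digits := PySem.Int.toChars first_given_number
  let second_digits := PySem.Int.toChars second_given_number
  let p := if first_digits.length > second_digits.length
           then (first_digits, second_digits) else (second_digits, first_digits)
  let longer_digits := p.1
  let shorter_digits := p.2
  let output := (List.range shorter_digits.length).foldl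
      (fun o i => o ++ (if longer_digits.getD i ' ' = shorter_digits.getD i ' '
                        then ['1'] else ['0'])) []
  let output := (List.range (longer_digits.length - shorter_digits.length)).foldl
      (fun o _ => o ++ ['0']) output
  String.ofList output

-- ===== PORT B =====
-- B's helper go(xs, ys): recursion on the two char lists; bit is '1' iff both are
-- nonempty and the heads match, result is bit consed onto the recursion on the tails.
def pairwiseGo : List Char → List Char → List Char
  | [], [] => []
  | x :: xs, y :: ys => (if x = y then '1' else '0') :: pairwiseGo xs ys
  | _ :: xs, [] => '0' :: pairwiseGo xs []
  | [], _ :: ys => '0' :: pairwiseGo [] ys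

def pairwise_digits_alt (first_given_number : Int) (second_given_number : Int) : String :=
  String.ofList (pairwiseGo (PySem.Int.toChars first_given_number)
                            (PySem.Int.toChars second_given_number))

-- ===== PRECONDITION & SPEC =====
def Spec_pairwise_digits (first_given_number : Int) (second_given_number : Int) (out : String) : Prop := out = pairwise_digits_alt first_given_number second_given_number
instance (first_given_number : Int) (second_given_number : Int) (out : String) : Decidable (Spec_pairwise_digits first_given_number second_given_number out) := by unfold Spec_pairwise_digits; infer_instance

-- ===== CLAIM (what is proved, stated in full; the proofs are below) =====
def Claim_equal_pairwise_digits : Prop := ∀ (first_given_number : Int) (second_given_number : Int), Dom_pairwise_digits first_given_number second_given_number → Spec_pairwise_digits first_given_number second_given_number (pairwise_digits first_given_number second_given_number)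

-- ===== LEMMAS AND PROOFS =====

-- A's concatenation loop over range n equals the mapped list.
theorem pv_foldl_snoc (g : Nat → Char) (n : Nat) (acc : List Char) :
    (List.range n).foldl (fun o i => o ++ [g i]) acc
      = acc ++ (List.range n).map g := by
  induction n generalizing acc with
  | zero => simp
  | succ m ih => simp [List.range_succ, ih]

-- A's result, as a map over range (max of the lengths).
theorem pv_A_map (s1 s2 : List Char) :
    (let p := if s1.length > s2.length then (s1, s2) else (s2, s1)
     let longer_digits := p.1
     let shorter_digits := p.2
     let output := (List.range shorter_digits.length).foldl
        (fun o i => o ++ (if longer_digits.getD i ' ' = shorter_digits.getD i ' '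
                          then ['1'] else ['0'])) []
     (List.range (longer_digits.length - shorter_digits.length)).foldl
        (fun o _ => o ++ ['0']) output)
    = (List.range (max s1.length s2.length)).map
        (fun i => if i < s1.length ∧ i < s2.length ∧ s1.getD i ' ' = s2.getD i ' '
                  then '1' else '0') := by
  have hsnoc : ∀ (longer shorter : List Char),
      (fun (o : List Char) (i : Nat) =>
        o ++ (if longer.getD i ' ' = shorter.getD i ' ' then ['1'] else ['0']))
      = (fun o i => o ++ [if longer.getD i ' ' = shorter.getD i ' ' then '1' else '0']) := by
    intro longer shorter
    funext o i
    split_ifs <;> rfl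
  simp only
  by_cases h : s1.length > s2.length
  · rw [if_pos h]
    simp only [hsnoc]
    rw [pv_foldl_snoc, pv_foldl_snoc, List.nil_append]
    have hmax : max s1.length s2.length = s2.length + (s1.length - s2.length) := by omega
    rw [hmax, List.range_add, List.map_append, List.map_map]
    congr 1
    · apply List.map_congr_left
      intro i hi
      rw [List.mem_range] at hi
      have h1 : i < s1.length := by omega
      simp only [hi, h1, true_and]
    · apply List.map_congr_left
      intro j _
      have : ¬ (s2.length + j < s1.length ∧ s2.length + j < s2.length ∧
          s1.getD (s2.length + j) ' ' = s2.getD (s2.length + j) ' ') := by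
        rintro ⟨-, h2, -⟩; omega
      simp only [Function.comp_apply, this, if_false]
  · rw [if_neg h]
    simp only [hsnoc]
    rw [pv_foldl_snoc, pv_foldl_snoc, List.nil_append]
    have hmax : max s1.length s2.length = s1.length + (s2.length - s1.length) := by omega
    rw [hmax, List.range_add, List.map_append, List.map_map]
    congr 1
    · apply List.map_congr_left
      intro i hi
      rw [List.mem_range] at hi
      have h2 : i < s2.length := by omega
      simp only [hi, h2, true_and]
      by_cases he : s1.getD i ' ' = s2.getD i ' '
      · rw [if_pos he.symm, if_pos he]
      · rw [if_neg (fun hc => he hc.symm), if_neg he]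
    · apply List.map_congr_left
      intro j _
      have : ¬ (s1.length + j < s1.length ∧ s1.length + j < s2.length ∧
          s1.getD (s1.length + j) ' ' = s2.getD (s1.length + j) ' ') := by
        rintro ⟨h1, -, -⟩; omega
      simp only [Function.comp_apply, this, if_false]

-- B's recursion on an exhausted side emits only '0's.
theorem pv_go_nil_right (xs : List Char) : pairwiseGo xs [] = List.replicate xs.length '0' := by
  induction xs with
  | nil => simp [pairwiseGo]
  | cons x xs ih => simp [pairwiseGo, ih, List.replicate_succ]

theorem pv_go_nil_left (ys : List Char) : pairwiseGo [] ys = List.replicate ys.length '0' := by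
  induction ys with
  | nil => simp [pairwiseGo]
  | cons y ys ih => simp [pairwiseGo, ih, List.replicate_succ]

-- B's recursion computes the same map over range (max of the lengths).
theorem pv_go_map (s1 s2 : List Char) :
    pairwiseGo s1 s2
      = (List.range (max s1.length s2.length)).map
          (fun i => if i < s1.length ∧ i < s2.length ∧ s1.getD i ' ' = s2.getD i ' '
                    then '1' else '0') := by
  induction s1 generalizing s2 with
  | nil =>
    rw [pv_go_nil_left]
    simp only [List.length_nil, Nat.max_eq_right (Nat.zero_le _)]
    symm
    rw [List.eq_replicate_iff]
    refine ⟨by simp, ?_⟩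
    intro b hb
    simp only [List.mem_map, List.mem_range] at hb
    rcases hb with ⟨i, -, rfl⟩
    simp
  | cons x xs ih =>
    cases s2 with
    | nil =>
      rw [pv_go_nil_right]
      simp only [List.length_cons, List.length_nil, Nat.max_eq_left (Nat.zero_le _)]
      symm
      rw [List.eq_replicate_iff]
      refine ⟨by simp, ?_⟩
      intro b hb
      simp only [List.mem_map, List.mem_range] at hb
      rcases hb with ⟨i, -, rfl⟩
      simp
    | cons y ys =>
      simp only [pairwiseGo, ih, List.length_cons, Nat.succ_max_succ,
        List.range_succ_eq_map, List.map_cons, List.map_map]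
      congr 1
      · simp [List.getD]
      · apply List.map_congr_left
        intro i _
        simp only [Function.comp_apply, Nat.succ_eq_add_one, Nat.add_lt_add_iff_right,
          List.getD_cons_succ]

-- ===== VERDICT (by name: the statement is the Claim_ definition above) =====
theorem pairwise_digits_spec : Claim_equal_pairwise_digits := by
  intro a b _
  show pairwise_digits a b = pairwise_digits_alt a b
  unfold pairwise_digits pairwise_digits_alt
  exact congrArg String.ofList
    ((pv_A_map (PySem.Int.toChars a) (PySem.Int.toChars b)).trans
      (pv_go_map (PySem.Int.toChars a) (PySem.Int.toChars b)).symm)
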